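-- pv_equiv track=rewrite | github.com/vonJOKER/py-homework | py第六次作业/2(1).py | mySum
-- ===== SOURCE A (Python) =====
-- def mySum(a,n):
--     a=str(a)
--     s=0
--     c=0
--     for i in range (1,n+1):
--         c=int(i*a)
--         s+=c
--     return(s)
-- ===== SOURCE B (Python) =====
-- def mySum(a, n):
--     # closed form: sum of a's decimal string repeated i times, i = 1..n
--     if n < 1:
--         return 0
--     q = 10 ** len(str(a))
--     u = (pow(q, n + 1) - q) // (q - 1)
--     return a * ((u - n) // (q - 1))
-- ===== Notes on version B (the rewrite author's own statement) =====
-- stated objective: faster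
-- what changed: Replaces the per-iteration string repetition and re-parsing (int(i*str(a)) for each i) by a closed-form geometric sum of repunits in base 10**len(str(a)) computed with fast integer pow and two exact divisions.
-- outside the precondition, e.g. on mySum(-5, 2): A raises ValueError, B returns -510
import Mathlib
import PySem

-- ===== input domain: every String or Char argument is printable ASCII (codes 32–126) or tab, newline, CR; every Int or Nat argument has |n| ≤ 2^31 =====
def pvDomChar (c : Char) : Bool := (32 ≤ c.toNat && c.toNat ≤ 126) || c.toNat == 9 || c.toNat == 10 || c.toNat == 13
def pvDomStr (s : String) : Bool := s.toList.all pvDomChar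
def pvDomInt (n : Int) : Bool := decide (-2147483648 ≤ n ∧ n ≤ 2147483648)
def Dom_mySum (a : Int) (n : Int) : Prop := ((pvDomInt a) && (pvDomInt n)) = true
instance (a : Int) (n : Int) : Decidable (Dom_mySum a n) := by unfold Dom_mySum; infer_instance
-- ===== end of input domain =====

-- B replaces A's per-iteration string repetition and re-parsing by a closed-form geometric
-- sum of base-10^len(str(a)) repunits (integer pow + two exact floor divisions).

-- ===== PORT A =====
-- literal transliteration of A: a = str(a); for i in range(1, n+1): c = int(i*a); s += c
def mySum (a : Int) (n : Int) : Int :=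
  let aS := PySem.Int.toStr a
  ((PySem.List.pyRange 1 (n + 1) 1).foldl
    (fun (st : Int × Int) i =>
      -- c = int(i*a); `.getD 0` totalises the ValueError case, which Pre_mySum excludes
      let c := (PySem.Int.ofChars? (PySem.List.pyRepeat aS.toList i)).getD 0
      (st.1 + c, c)) ((0 : Int), (0 : Int))).1

-- ===== PORT B =====
-- transliteration of Source B: closed-form geometric sum of repunits in base q = 10**len(str(a))
def mySum_alt (a : Int) (n : Int) : Int :=
  if n < 1 then 0
  else
    let q : Int := 10 ^ (PySem.Str.len (PySem.Int.toStr a)).toNat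
    let u := PySem.Int.floordiv (q ^ (n + 1).toNat - q) (q - 1)
    a * PySem.Int.floordiv (u - n) (q - 1)

-- ===== PRECONDITION & SPEC =====
-- Pre_ excludes a < 0 with n ≥ 2: there `i*str(a)` repeats the '-' sign and int() raises ValueError.
def Pre_mySum (a : Int) (n : Int) : Prop := 0 ≤ a ∨ n ≤ 1
instance (a : Int) (n : Int) : Decidable (Pre_mySum a n) := by unfold Pre_mySum; infer_instance
def pvWitness_mySum : Int × Int := (3, 4)

def Spec_mySum (a : Int) (n : Int) (out : Int) : Prop := out = mySum_alt a n
instance (a : Int) (n : Int) (out : Int) : Decidable (Spec_mySum a n out) := by unfold Spec_mySum; infer_instance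

-- ===== CLAIM (what is proved, stated in full; the proofs are below) =====
def Claim_equal_mySum : Prop := ∀ (a : Int) (n : Int), Dom_mySum a n → Pre_mySum a n → Spec_mySum a n (mySum a n)

-- ===== LEMMAS AND PROOFS =====

-- Horner valuation of a digit string
def pvStep (acc : Nat) (c : Char) : Nat := acc * 10 + (c.toNat - 48)
def pvVal (acc : Nat) (ds : List Char) : Nat := ds.foldl pvStep acc

-- public model of the (private) digit parser inside PySem.Int.ofChars?
def pgo : List Char → Bool → Nat → Option Nat
  | [], b, acc => if b then some acc else none
  | c :: r, b, acc =>
    if c.isDigit then pgo r true (acc * 10 + (c.toNat - 48))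
    else if c = '_' ∧ b = true then
      (match r with
       | d :: _ => if d.isDigit then pgo r false acc else none
       | [] => none)
    else none

def model (G : List Char → Bool → Nat → Option Nat) (s : List Char) : Option Int :=
  match (List.dropWhile PySem.Int.isIntSpace (List.dropWhile PySem.Int.isIntSpace s).reverse).reverse with
  | '-' :: ds => Option.map (fun n => -n) ((match ds with | [] => none | cs => G cs false 0).bind fun a => some ((a : Int)))
  | '+' :: ds => Option.map (fun n => n) ((match ds with | [] => none | cs => G cs false 0).bind fun a => some ((a : Int)))
  | ds => Option.map (fun n => n) ((match ds with | [] => none | cs => G cs false 0).bind fun a => some ((a : Int)))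

-- `ofChars?` delegates to a private recursive digit parser; we capture it by unification
-- (the `rfl`s below hold definitionally) and replace it with the public clone `pgo`.
theorem ofChars_eq_model : PySem.Int.ofChars? = model pgo := by
  obtain ⟨G, h1, hnil, hcons⟩ :
      ∃ G : List Char → Bool → Nat → Option Nat,
        PySem.Int.ofChars? = model G
        ∧ (∀ b acc, G [] b acc = if b then some acc else none)
        ∧ (∀ c r b acc, G (c :: r) b acc =
            if c.isDigit then G r true (acc * 10 + (c.toNat - 48))
            else if c = '_' ∧ b = true then
              (match r with
               | d :: _ => if d.isDigit then G r false acc else none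
               | [] => none)
            else none) :=
    ⟨_, rfl, fun _ _ => rfl, fun _ _ _ _ => rfl⟩
  have hG : G = pgo := by
    funext cs
    induction cs with
    | nil => funext b acc; rw [hnil]; rfl
    | cons c r ih =>
      funext b acc
      rw [hcons]
      show _ = pgo (c :: r) b acc
      rw [pgo.eq_def]
      rw [ih]
  rw [h1, hG]

theorem pvVal_append (acc : Nat) (xs ys : List Char) :
    pvVal acc (xs ++ ys) = pvVal (pvVal acc xs) ys := List.foldl_append ..

theorem pvVal_linear (ds : List Char) : ∀ acc, pvVal acc ds = acc * 10 ^ ds.length + pvVal 0 ds := by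
  induction ds with
  | nil => intro acc; simp [pvVal]
  | cons c r ih =>
    intro acc
    show pvVal (pvStep acc c) r = acc * 10 ^ (c :: r).length + pvVal (pvStep 0 c) r
    rw [ih (pvStep acc c), ih (pvStep 0 c)]
    simp [pvStep, List.length_cons, pow_succ]
    ring

theorem pgo_true_digits (ds : List Char) : (∀ c ∈ ds, c.isDigit = true) →
    ∀ acc, pgo ds true acc = some (pvVal acc ds) := by
  induction ds with
  | nil => intro _ acc; simp [pgo, pvVal]
  | cons c r ih =>
    intro h acc
    have hc : c.isDigit = true := h c (by simp)
    show pgo (c :: r) true acc = some (pvVal (pvStep acc c) r)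
    rw [pgo.eq_def]
    simp only [hc, if_true]
    exact ih (fun x hx => h x (by simp [hx])) _

theorem pgo_false_digits (ds : List Char) (hne : ds ≠ []) (h : ∀ c ∈ ds, c.isDigit = true)
    (acc : Nat) : pgo ds false acc = some (pvVal acc ds) := by
  cases ds with
  | nil => exact absurd rfl hne
  | cons c r =>
    have hc : c.isDigit = true := h c (by simp)
    show pgo (c :: r) false acc = some (pvVal (pvStep acc c) r)
    rw [pgo.eq_def]
    simp only [hc, if_true]
    exact pgo_true_digits r (fun x hx => h x (by simp [hx])) _

theorem isIntSpace_of_isDigit (c : Char) (h : c.isDigit = true) : PySem.Int.isIntSpace c = false := by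
  simp only [Char.isDigit] at h
  simp only [PySem.Int.isIntSpace, Bool.or_eq_false_iff, decide_eq_false_iff_not]
  refine ⟨⟨⟨⟨⟨?_, ?_⟩, ?_⟩, ?_⟩, ?_⟩, ?_⟩ <;> rintro rfl <;> simp_all

theorem dropWhile_all_false {p : Char → Bool} {l : List Char} (h : ∀ c ∈ l, p c = false) :
    l.dropWhile p = l := by
  cases l with
  | nil => rfl
  | cons c r => rw [List.dropWhile_cons_of_neg (by simp [h c (by simp)])]

theorem strip_id {l : List Char} (h : ∀ c ∈ l, PySem.Int.isIntSpace c = false) :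
    (List.dropWhile PySem.Int.isIntSpace (List.dropWhile PySem.Int.isIntSpace l).reverse).reverse = l := by
  rw [dropWhile_all_false h, dropWhile_all_false (fun c hc => h c (List.mem_reverse.mp hc)),
    List.reverse_reverse]

-- parse a sign-free digit string
theorem ofChars_digits (ds : List Char) (hne : ds ≠ []) (h : ∀ c ∈ ds, c.isDigit = true) :
    PySem.Int.ofChars? ds = some ((pvVal 0 ds : Nat) : Int) := by
  rw [ofChars_eq_model]
  rw [model, strip_id (fun c hc => isIntSpace_of_isDigit c (h c hc))]
  split
  · exact absurd (h '-' (by simp)) (by decide)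
  · exact absurd (h '+' (by simp)) (by decide)
  · cases ds with
    | nil => exact absurd rfl hne
    | cons c r =>
      have hred : (match c :: r with | [] => none | cs => pgo cs false 0) = pgo (c :: r) false 0 := rfl
      rw [hred, pgo_false_digits (c :: r) (by simp) h 0]
      rfl

-- ---- Nat.toDigits facts ----
theorem tdc_append : ∀ (f n : Nat) (ds : List Char),
    Nat.toDigitsCore 10 f n ds = Nat.toDigitsCore 10 f n [] ++ ds := by
  intro f
  induction f with
  | zero => intro n ds; simp [Nat.toDigitsCore]
  | succ f ih =>
    intro n ds
    simp only [Nat.toDigitsCore]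
    split
    · simp
    · rw [ih (n / 10) ((n % 10).digitChar :: ds), ih (n / 10) [(n % 10).digitChar]]
      simp

theorem tdc_fuel (n : Nat) : ∀ (f : Nat) (ds : List Char), n < f →
    Nat.toDigitsCore 10 f n ds = Nat.toDigitsCore 10 (n + 1) n ds := by
  induction n using Nat.strong_induction_on with
  | _ n ih =>
    intro f ds hf
    match f, hf with
    | f + 1, _ =>
      simp only [Nat.toDigitsCore]
      split
      · rfl
      · rename_i hne
        have h10 : 10 ≤ n := by
          by_contra hlt
          exact hne (Nat.div_eq_of_lt (by omega))
        have hdiv : n / 10 < n := Nat.div_lt_self (by omega) (by omega)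
        rw [ih (n / 10) hdiv (f) _ (by omega), ← ih (n / 10) hdiv n _ (by omega)]

def dig (m : Nat) : List Char := Nat.toDigits 10 m

theorem dig_lt (m : Nat) (h : m < 10) : dig m = [Nat.digitChar m] := by
  simp only [dig, Nat.toDigits, Nat.toDigitsCore]
  rw [if_pos (Nat.div_eq_of_lt h), Nat.mod_eq_of_lt h]

theorem dig_ge (m : Nat) (h : 10 ≤ m) : dig m = dig (m / 10) ++ [Nat.digitChar (m % 10)] := by
  have hdiv : m / 10 < m := Nat.div_lt_self (by omega) (by omega)
  have h1 : dig m = Nat.toDigitsCore 10 m (m / 10) [(m % 10).digitChar] := by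
    simp only [dig, Nat.toDigits, Nat.toDigitsCore]
    rw [if_neg (show ¬ m / 10 = 0 by omega)]
  rw [h1, tdc_append m (m / 10) [(m % 10).digitChar], tdc_fuel (m / 10) m [] (by omega)]
  rfl

theorem digitChar_isDigit (d : Nat) (h : d < 10) : (Nat.digitChar d).isDigit = true := by
  interval_cases d <;> decide

theorem digitChar_val (d : Nat) (h : d < 10) : (Nat.digitChar d).toNat - 48 = d := by
  interval_cases d <;> decide

theorem dig_digits (m : Nat) : ∀ c ∈ dig m, c.isDigit = true := by
  induction m using Nat.strong_induction_on with
  | _ m ih =>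
    by_cases h : m < 10
    · rw [dig_lt m h]
      intro c hc
      simp at hc
      subst hc
      exact digitChar_isDigit m h
    · rw [dig_ge m (by omega)]
      intro c hc
      rcases List.mem_append.mp hc with h1 | h2
      · exact ih (m / 10) (Nat.div_lt_self (by omega) (by omega)) c h1
      · simp at h2; subst h2; exact digitChar_isDigit _ (Nat.mod_lt _ (by omega))

theorem dig_ne_nil (m : Nat) : dig m ≠ [] := by
  by_cases h : m < 10
  · rw [dig_lt m h]; simp
  · rw [dig_ge m (by omega)]; simp

theorem dig_val (m : Nat) : ∀ acc, pvVal acc (dig m) = acc * 10 ^ (dig m).length + m := by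
  induction m using Nat.strong_induction_on with
  | _ m ih =>
    intro acc
    by_cases h : m < 10
    · rw [dig_lt m h]
      show pvStep acc (Nat.digitChar m) = acc * 10 ^ ([Nat.digitChar m].length) + m
      simp [pvStep, digitChar_val m h]
    · rw [dig_ge m (by omega)]
      rw [pvVal, List.foldl_append]
      show pvVal (pvVal acc (dig (m / 10))) [(m % 10).digitChar] = _
      rw [ih (m / 10) (Nat.div_lt_self (by omega) (by omega)) acc]
      show pvStep (acc * 10 ^ (dig (m / 10)).length + m / 10) ((m % 10).digitChar) = _
      rw [pvStep, digitChar_val _ (Nat.mod_lt _ (by omega))]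
      simp [List.length_append, pow_succ]
      ring_nf
      omega

theorem pvVal_dig (m : Nat) : pvVal 0 (dig m) = m := by
  rw [dig_val m 0]; simp

-- ---- repeated digit blocks ----
def repL (m k : Nat) : List Char := (List.replicate k (dig m)).flatten

def TN (m : Nat) : Nat → Nat
  | 0 => 0
  | k + 1 => (10 ^ (dig m).length) ^ k + TN m k

def SSN (m : Nat) : Nat → Nat
  | 0 => 0
  | k + 1 => SSN m k + TN m (k + 1)

theorem repL_succ (m k : Nat) : repL m (k + 1) = dig m ++ repL m k := by
  simp [repL, List.replicate_succ]

theorem repL_len (m k : Nat) : (repL m k).length = k * (dig m).length := by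
  induction k with
  | zero => simp [repL]
  | succ k ih => rw [repL_succ, List.length_append, ih]; ring

theorem repL_digits (m k : Nat) : ∀ c ∈ repL m k, c.isDigit = true := by
  induction k with
  | zero => simp [repL]
  | succ k ih =>
    rw [repL_succ]
    intro c hc
    rcases List.mem_append.mp hc with h1 | h2
    · exact dig_digits m c h1
    · exact ih c h2

theorem repL_val (m : Nat) : ∀ k, pvVal 0 (repL m k) = m * TN m k := by
  intro k
  induction k with
  | zero => simp [repL, pvVal, TN]
  | succ k ih =>
    rw [repL_succ, pvVal_append, dig_val m 0, pvVal_linear (repL m k), ih, repL_len, TN]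
    simp only [zero_mul, zero_add]
    rw [← pow_mul]
    ring

theorem repL_ne_nil (m k : Nat) (hk : 1 ≤ k) : repL m k ≠ [] := by
  match k, hk with
  | k + 1, _ =>
    rw [repL_succ]
    intro hbad
    exact dig_ne_nil m (List.append_eq_nil_iff.mp hbad).1

theorem ofChars_repL (m k : Nat) (hk : 1 ≤ k) :
    PySem.Int.ofChars? (repL m k) = some ((m * TN m k : Nat) : Int) := by
  rw [ofChars_digits (repL m k) (repL_ne_nil m k hk) (repL_digits m k), repL_val]

-- ---- the A-side loop ----
theorem pyRange_one_nil : PySem.List.pyRange 1 1 1 = [] := by decide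

theorem loopA (m : Nat) : ∀ k : Nat,
    ((PySem.List.pyRange 1 ((k : Int) + 1) 1).foldl
      (fun (st : Int × Int) i =>
        let c := (PySem.Int.ofChars? (PySem.List.pyRepeat (dig m) i)).getD 0
        (st.1 + c, c)) ((0 : Int), (0 : Int)))
      = (((m * SSN m k : Nat) : Int), ((m * TN m k : Nat) : Int)) := by
  intro k
  induction k with
  | zero => simp only [Nat.cast_zero, zero_add, pyRange_one_nil, List.foldl_nil, SSN, TN]; simp
  | succ k ih =>
    have hcast : ((k + 1 : Nat) : Int) + 1 = ((k : Int) + 1) + 1 := by push_cast; ring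
    rw [hcast, PySem.List.pyRange_one_succ_right (by omega : (1 : Int) ≤ (k : Int) + 1),
      List.foldl_append, ih]
    have hrep : PySem.List.pyRepeat (dig m) ((k : Int) + 1) = repL m (k + 1) := by
      show (List.replicate ((k : Int) + 1).toNat (dig m)).flatten = _
      norm_num [repL]
    simp only [List.foldl_cons, List.foldl_nil, hrep, ofChars_repL m (k + 1) (by omega)]
    rw [Option.getD_some]
    rw [show SSN m (k + 1) = SSN m k + TN m (k + 1) from rfl]
    rw [Prod.mk.injEq]
    refine ⟨by push_cast; ring, rfl⟩

-- ---- the B-side closed form ----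
theorem toChars_nonneg (a : Int) (ha : 0 ≤ a) : PySem.Int.toChars a = dig a.toNat := by
  simp [PySem.Int.toChars, dig, show ¬ a < 0 by omega]

theorem toChars_neg (a : Int) (ha : a < 0) : PySem.Int.toChars a = '-' :: dig a.natAbs := by
  simp [PySem.Int.toChars, dig, ha]

theorem toStr_len (a : Int) : (PySem.Str.len (PySem.Int.toStr a)).toNat = (PySem.Int.toChars a).length := by
  rw [PySem.Str.len_eq, PySem.Int.toList_toStr]
  simp

theorem toChars_len_pos (a : Int) : 1 ≤ (PySem.Int.toChars a).length := by
  by_cases ha : 0 ≤ a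
  · rw [toChars_nonneg a ha]
    cases h : dig a.toNat with
    | nil => exact absurd h (dig_ne_nil _)
    | cons c r => simp
  · rw [toChars_neg a (by omega)]; simp

theorem geomT (L : Nat) (m : Nat) (hLm : (dig m).length = L) :
    ∀ j, ((10 : Int) ^ L - 1) * ((TN m j : Nat) : Int) = (10 : Int) ^ (L * j) - 1 := by
  intro j
  induction j with
  | zero => simp [TN]
  | succ j ih =>
    rw [show TN m (j + 1) = (10 ^ (dig m).length) ^ j + TN m j from rfl, hLm]
    push_cast
    rw [mul_add, ih, show L * (j + 1) = L * j + L by ring, pow_add, ← pow_mul]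
    ring

theorem geomS (L : Nat) (m : Nat) (hLm : (dig m).length = L) :
    ∀ k, ((10 : Int) ^ L - 1) * ((SSN m k : Nat) : Int)
      = (10 : Int) ^ L * ((TN m k : Nat) : Int) - k := by
  intro k
  induction k with
  | zero => simp [SSN, TN]
  | succ k ih =>
    rw [show SSN m (k + 1) = SSN m k + TN m (k + 1) from rfl]
    push_cast
    rw [mul_add, ih]
    have h2 : ((TN m (k + 1) : Nat) : Int) = ((10 : Int) ^ L) ^ k + ((TN m k : Nat) : Int) := by
      rw [show TN m (k + 1) = (10 ^ (dig m).length) ^ k + TN m k from rfl, hLm]; push_cast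
      rw [← pow_mul]
    rw [h2]
    have h3 := geomT L m hLm k
    rw [pow_mul] at h3
    linear_combination h3

theorem floordiv_exact (b X : Int) (hb : 0 < b) : PySem.Int.floordiv (b * X) b = X := by
  rw [PySem.Int.floordiv_eq_ediv_of_pos hb, Int.mul_ediv_cancel_left X (by omega)]

theorem mySum_alt_eval (a : Int) (ha : 0 ≤ a) (n : Int) (hn : 1 ≤ n) :
    mySum_alt a n = a * ((SSN a.toNat n.toNat : Nat) : Int) := by
  rw [mySum_alt, if_neg (by omega)]
  set m := a.toNat with hm
  set L := (dig m).length with hL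
  have hLen : (PySem.Str.len (PySem.Int.toStr a)).toNat = L := by
    rw [toStr_len, toChars_nonneg a ha]
  rw [hLen]
  have hL1 : 1 ≤ L := by
    have := toChars_len_pos a
    rwa [toChars_nonneg a ha] at this
  have hq : (1 : Int) < 10 ^ L := by
    calc (1 : Int) < 10 ^ 1 := by norm_num
    _ ≤ 10 ^ L := by exact pow_le_pow_right₀ (by norm_num) hL1
  have hpos : (0 : Int) < 10 ^ L - 1 := by omega
  set k := n.toNat with hk
  have hnk : (n + 1).toNat = k + 1 := by omega
  show a * PySem.Int.floordiv
      ((PySem.Int.floordiv (((10 : Int) ^ L) ^ (n + 1).toNat - 10 ^ L) (10 ^ L - 1)) - n)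
      (10 ^ L - 1) = a * ((SSN m k : Nat) : Int)
  have hu : ((10 : Int) ^ L) ^ (n + 1).toNat - 10 ^ L
      = (10 ^ L - 1) * ((10 : Int) ^ L * ((TN m k : Nat) : Int)) := by
    have hgt := geomT L m rfl k
    rw [pow_mul] at hgt
    rw [hnk]
    linear_combination (-((10 : Int) ^ L)) * hgt
  rw [hu, floordiv_exact _ _ hpos]
  have hkn : ((k : Nat) : Int) = n := by omega
  have h2 : (10 : Int) ^ L * ((TN m k : Nat) : Int) - n
      = (10 ^ L - 1) * ((SSN m k : Nat) : Int) := by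
    rw [geomS L m rfl k, hkn]
  rw [h2, floordiv_exact _ _ hpos]

-- ---- corner cases ----
theorem mySum_nonpos (a : Int) (n : Int) (hn : n ≤ 0) : mySum a n = 0 := by
  rw [mySum]
  have : PySem.List.pyRange 1 (n + 1) 1 = [] := by
    simp [PySem.List.pyRange, show ¬ (1 : Int) < n + 1 by omega]
  rw [this]
  rfl

theorem ofChars_toChars (a : Int) : PySem.Int.ofChars? (PySem.Int.toChars a) = some a := by
  by_cases ha : 0 ≤ a
  · rw [toChars_nonneg a ha,
      ofChars_digits _ (dig_ne_nil _) (dig_digits _), pvVal_dig]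
    congr 1
    omega
  · rw [toChars_neg a (by omega), ofChars_eq_model, model]
    have hmem : ∀ c ∈ '-' :: dig a.natAbs, PySem.Int.isIntSpace c = false := by
      intro c hc
      rcases List.mem_cons.mp hc with h1 | h2
      · subst h1; decide
      · exact isIntSpace_of_isDigit c (dig_digits _ c h2)
    rw [strip_id hmem]
    show Option.map (fun n => -n)
        ((match dig a.natAbs with | [] => none | cs => pgo cs false 0).bind fun x => some ((x : Int))) = some a
    cases hd : dig a.natAbs with
    | nil => exact absurd hd (dig_ne_nil _)
    | cons c r =>
      have hred : (match c :: r with | [] => none | cs => pgo cs false 0) = pgo (c :: r) false 0 := rfl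
      rw [hred, pgo_false_digits (c :: r) (by simp) (by rw [← hd]; exact dig_digits _) 0]
      have : pvVal 0 (c :: r) = a.natAbs := by rw [← hd, pvVal_dig]
      rw [this]
      simp only [Option.bind_some, Option.map_some]
      congr 1
      omega

theorem pyRepeat_one (xs : List Char) : PySem.List.pyRepeat xs 1 = xs := by
  show (List.replicate (1 : Int).toNat xs).flatten = xs
  norm_num

theorem mySum_one (a : Int) : mySum a 1 = a := by
  rw [mySum]
  have h2 : PySem.List.pyRange 1 (1 + 1) 1 = [1] := by decide
  rw [h2]
  simp only [List.foldl_cons, List.foldl_nil]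
  rw [pyRepeat_one, PySem.Int.toList_toStr, ofChars_toChars]
  simp

theorem mySum_alt_one (a : Int) : mySum_alt a 1 = a := by
  rw [mySum_alt, if_neg (by omega)]
  set L := (PySem.Str.len (PySem.Int.toStr a)).toNat with hL
  have hL1 : 1 ≤ L := by
    rw [hL, PySem.Str.len_eq, PySem.Int.toList_toStr]
    have := toChars_len_pos a
    omega
  have hq : (1 : Int) < 10 ^ L :=
    calc (1 : Int) < 10 ^ 1 := by norm_num
    _ ≤ 10 ^ L := pow_le_pow_right₀ (by norm_num) hL1
  have hpos : (0 : Int) < 10 ^ L - 1 := by omega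
  show a * PySem.Int.floordiv
      ((PySem.Int.floordiv (((10 : Int) ^ L) ^ ((1 : Int) + 1).toNat - 10 ^ L) (10 ^ L - 1)) - 1)
      (10 ^ L - 1) = a
  have h1 : ((10 : Int) ^ L) ^ ((1 : Int) + 1).toNat - 10 ^ L
      = (10 ^ L - 1) * (10 ^ L) := by
    show ((10 : Int) ^ L) ^ (2 : Nat) - 10 ^ L = _
    ring
  rw [h1, floordiv_exact _ _ hpos]
  have h2 : (10 : Int) ^ L - 1 = (10 ^ L - 1) * 1 := by ring
  nth_rewrite 1 [h2]
  rw [floordiv_exact _ _ hpos]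
  ring

-- ===== VERDICT (by name: the statement is the Claim_ definition above) =====
theorem mySum_spec : Claim_equal_mySum := by
  intro a n _ hpre
  show mySum a n = mySum_alt a n
  by_cases hn0 : n ≤ 0
  · rw [mySum_nonpos a n hn0, mySum_alt, if_pos (by omega)]
  · have hn1 : 1 ≤ n := by omega
    by_cases ha : 0 ≤ a
    · rw [mySum_alt_eval a ha n hn1]
      have hnn : ((n.toNat : Nat) : Int) = n := by omega
      have h := loopA a.toNat n.toNat
      rw [hnn] at h
      have hlist : (PySem.Int.toStr a).toList = dig a.toNat := by
        rw [PySem.Int.toList_toStr, toChars_nonneg a ha]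
      rw [mySum]
      show ((PySem.List.pyRange 1 (n + 1) 1).foldl
          (fun (st : Int × Int) i =>
            let c := (PySem.Int.ofChars? (PySem.List.pyRepeat (PySem.Int.toStr a).toList i)).getD 0
            (st.1 + c, c)) ((0 : Int), (0 : Int))).1 = _
      rw [hlist, h]
      show ((a.toNat * SSN a.toNat n.toNat : Nat) : Int) = _
      push_cast
      rw [show ((a.toNat : Nat) : Int) = a by omega]
    · have h1 : n = 1 := by
        rcases hpre with h | h
        · exact absurd h ha
        · omega
      subst h1
      rw [mySum_one, mySum_alt_one]
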